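-- pv_equiv track=rewrite | github.com/Kasa1905/-Professional-Bank-Management-System | utils/helpers.py | format_account_number
-- ===== SOURCE A (Python) =====
-- def format_account_number(account_number: str) -> str:
--     """Format account number for display"""
--     if not account_number:
--         return ""
--
--     # Add spaces every 4 characters for readability
--     formatted = ""
--     for i, char in enumerate(account_number):
--         if i > 0 and i % 4 == 0:
--             formatted += " "
--         formatted += char
--
--     return formatted
-- ===== SOURCE B (Python) =====
-- def format_account_number(account_number: str) -> str:
--     """Format account number for display"""
--     if not account_number:
--         return ""
--     chunks = [account_number[i:i + 4] for i in range(0, len(account_number), 4)]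
--     return " ".join(chunks)
-- ===== Notes on version B (the rewrite author's own statement) =====
-- stated objective: idiomatic
-- what changed: Replaced the per-character enumerate loop with index-modulo space insertion by slicing the string into fixed 4-character chunks over range(0, len, 4) and joining them with a single ' '.join.
import Mathlib
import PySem

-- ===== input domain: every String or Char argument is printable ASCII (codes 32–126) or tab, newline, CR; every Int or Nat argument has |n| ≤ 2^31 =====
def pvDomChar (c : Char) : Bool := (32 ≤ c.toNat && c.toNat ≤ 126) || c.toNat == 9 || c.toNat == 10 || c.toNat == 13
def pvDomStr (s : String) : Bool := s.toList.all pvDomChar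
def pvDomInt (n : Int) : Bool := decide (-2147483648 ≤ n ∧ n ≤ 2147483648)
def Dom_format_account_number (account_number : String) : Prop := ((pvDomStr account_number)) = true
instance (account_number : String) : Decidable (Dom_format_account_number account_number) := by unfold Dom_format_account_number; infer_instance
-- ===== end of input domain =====

-- B replaces A's per-character enumerate loop (space when i>0 and i%4==0) with slicing
-- into fixed 4-character chunks over range(0, len, 4) joined by ' '.join — more idiomatic.

-- ===== PORT A =====
-- per-character loop over enumerate, building the string left to right
def format_account_number (account_number : String) : String :=
  if account_number = "" then ""
  else
    String.ofList
      ((PySem.List.enumerate account_number.toList 0).foldl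
        (fun acc p =>
          (if 0 < p.1 ∧ PySem.Int.mod p.1 4 = 0 then acc ++ [' '] else acc) ++ [p.2])
        [])

-- ===== PORT B =====
-- chunks = [s[i:i+4] for i in range(0, len(s), 4)]; return " ".join(chunks)
def format_account_number_alt (account_number : String) : String :=
  if account_number = "" then ""
  else
    PySem.Str.join " "
      ((PySem.List.pyRange 0 (PySem.Str.len account_number) 4).map
        (fun i => String.ofList
          (PySem.List.slice account_number.toList (some i) (some (i + 4)))))

-- ===== PRECONDITION & SPEC =====
def Spec_format_account_number (account_number : String) (out : String) : Prop := out = format_account_number_alt account_number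
instance (account_number : String) (out : String) : Decidable (Spec_format_account_number account_number out) := by unfold Spec_format_account_number; infer_instance

-- ===== CLAIM (what is proved, stated in full; the proofs are below) =====
def Claim_equal_format_account_number : Prop := ∀ (account_number : String), Dom_format_account_number account_number → Spec_format_account_number account_number (format_account_number account_number)

-- ===== LEMMAS AND PROOFS =====

-- A's loop, index-indexed: space before the char exactly when the index is a multiple of 4
def pvInterleave : Nat → List Char → List Char
  | _, [] => []
  | n, c :: t => (if n % 4 = 0 then [' '] else []) ++ c :: pvInterleave (n + 1) t

theorem pvInterleave_nil (n : Nat) : pvInterleave n [] = [] := rfl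

theorem pvInterleave_cons (n : Nat) (c : Char) (t : List Char) :
    pvInterleave n (c :: t) = (if n % 4 = 0 then [' '] else []) ++ c :: pvInterleave (n + 1) t := rfl

-- B's chunk decomposition (4 characters at a time)
def pvChunkList : List Char → List (List Char)
  | [] => []
  | [a] => [[a]]
  | [a, b] => [[a, b]]
  | [a, b, c] => [[a, b, c]]
  | a :: b :: c :: d :: rest => [a, b, c, d] :: pvChunkList rest

theorem pvChunkList_ne_nil (c : Char) (t : List Char) : pvChunkList (c :: t) ≠ [] := by
  match t with
  | [] => simp [pvChunkList]
  | [a] => simp [pvChunkList]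
  | [a, b] => simp [pvChunkList]
  | a :: b :: d :: rest => simp [pvChunkList]

theorem pv_A_loop (cs : List Char) : ∀ (acc : List Char) (n : Nat), 0 < n →
    (PySem.List.enumerate cs (n : Int)).foldl
      (fun acc p =>
        (if 0 < p.1 ∧ PySem.Int.mod p.1 4 = 0 then acc ++ [' '] else acc) ++ [p.2])
      acc = acc ++ pvInterleave n cs := by
  induction cs with
  | nil => intro acc n _; simp [PySem.List.enumerate_nil, pvInterleave_nil]
  | cons c t ih =>
    intro acc n hn
    rw [PySem.List.enumerate_cons, List.foldl_cons]
    have hmod : PySem.Int.mod (n : Int) 4 = ((n % 4 : Nat) : Int) := by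
      exact_mod_cast PySem.Int.mod_natCast n 4
    have hcast : ((n : Int) + 1) = ((n + 1 : Nat) : Int) := by push_cast; ring
    rw [hcast, ih _ (n + 1) (by omega)]
    by_cases h4 : n % 4 = 0
    · have hc : (0 < (n : Int) ∧ PySem.Int.mod (n : Int) 4 = 0) := by
        refine ⟨by exact_mod_cast hn, ?_⟩
        simp only [hmod, h4, Nat.cast_zero]
      rw [if_pos hc, pvInterleave_cons, if_pos h4]
      simp
    · have hc : ¬ (0 < (n : Int) ∧ PySem.Int.mod (n : Int) 4 = 0) := by
        rintro ⟨-, hm⟩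
        rw [hmod] at hm
        exact h4 (by exact_mod_cast hm)
      rw [if_neg hc, pvInterleave_cons, if_neg h4]
      simp

theorem pvInterleave_shift (t : List Char) : ∀ n, pvInterleave (n + 4) t = pvInterleave n t := by
  induction t with
  | nil => intro n; rfl
  | cons c t ih =>
    intro n
    rw [pvInterleave_cons, pvInterleave_cons, Nat.add_mod_right]
    have h : n + 4 + 1 = (n + 1) + 4 := by omega
    rw [h, ih (n + 1)]

theorem pv_interleave_join_aux (fuel : Nat) : ∀ (t : List Char) (c : Char), t.length ≤ fuel →
    c :: pvInterleave 1 t = PySem.Chars.join [' '] (pvChunkList (c :: t)) := by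
  induction fuel with
  | zero =>
    intro t c ht
    have h : t = [] := List.eq_nil_of_length_eq_zero (by omega)
    subst h
    simp [pvChunkList, PySem.Chars.join_singleton, pvInterleave_nil]
  | succ m ih =>
    intro t c ht
    match t with
    | [] =>
      simp [pvChunkList, PySem.Chars.join_singleton, pvInterleave_nil]
    | [a] =>
      simp [pvChunkList, PySem.Chars.join_singleton, pvInterleave_cons, pvInterleave_nil]
    | [a, b] =>
      simp [pvChunkList, PySem.Chars.join_singleton, pvInterleave_cons, pvInterleave_nil]
    | [a, b, d] =>
      simp [pvChunkList, PySem.Chars.join_singleton, pvInterleave_cons, pvInterleave_nil]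
    | a :: b :: d :: r :: rr =>
      rw [show pvChunkList (c :: a :: b :: d :: r :: rr) = [c, a, b, d] :: pvChunkList (r :: rr) from rfl]
      obtain ⟨p, ps, hps⟩ := List.exists_cons_of_ne_nil (pvChunkList_ne_nil r rr)
      rw [hps, PySem.Chars.join_cons_cons, ← hps]
      have hr : rr.length ≤ m := by simp at ht; omega
      rw [← ih rr r hr]
      have h5 : pvInterleave 5 rr = pvInterleave 1 rr := by
        simpa using pvInterleave_shift rr 1
      simp [pvInterleave_cons, h5]

theorem pv_chunks_aux (fuel : Nat) : ∀ (cs : List Char), cs.length ≤ fuel →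
    (List.range ((cs.length + 3) / 4)).map (fun k => (cs.drop (4 * k)).take 4)
      = pvChunkList cs := by
  induction fuel with
  | zero =>
    intro cs h
    have hcs : cs = [] := List.eq_nil_of_length_eq_zero (by omega)
    subst hcs
    simp [pvChunkList]
  | succ m ih =>
    intro cs h
    match cs with
    | [] => simp [pvChunkList]
    | [a] => simp [pvChunkList, List.range_one]
    | [a, b] => simp [pvChunkList, List.range_one]
    | [a, b, c'] => simp [pvChunkList, List.range_one]
    | a :: b :: c' :: d :: rest =>
      have hM : ((a :: b :: c' :: d :: rest).length + 3) / 4 = (rest.length + 3) / 4 + 1 := by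
        simp; omega
      rw [hM, List.range_succ_eq_map, List.map_cons, List.map_map]
      rw [show pvChunkList (a :: b :: c' :: d :: rest) = [a, b, c', d] :: pvChunkList rest from rfl]
      congr 1
      have hd : rest.length ≤ m := by simp at h; omega
      rw [← ih rest hd]
      apply List.map_congr_left
      intro k _
      simp only [Function.comp_apply, Nat.succ_eq_add_one]
      have hdd : rest.drop (4 * k) = (a :: b :: c' :: d :: rest).drop (4 + 4 * k) :=
        List.drop_drop (i := 4 * k) (j := 4) (l := a :: b :: c' :: d :: rest)
      rw [show 4 * (k + 1) = 4 + 4 * k from by ring, ← hdd]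

theorem pv_B_chunks (cs : List Char) :
    (PySem.List.pyRange 0 (cs.length : Int) 4).map
        (fun i => PySem.List.slice cs (some i) (some (i + 4)))
      = pvChunkList cs := by
  rw [PySem.List.pyRange_of_pos 0 (cs.length : Int) (by norm_num), List.map_map]
  rw [← pv_chunks_aux cs.length cs (le_refl _)]
  by_cases hcs : cs = []
  · subst hcs; simp
  · have hpos : (0 : Int) < (cs.length : Int) := by
      have h := List.length_pos_of_ne_nil hcs
      exact_mod_cast h
    rw [if_pos hpos]
    have hM : (((cs.length : Int) - 0 + 4 - 1) / 4).toNat = (cs.length + 3) / 4 := by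
      have h : ((cs.length : Int) - 0 + 4 - 1) = ((cs.length + 3 : Nat) : Int) := by push_cast; ring
      rw [h, show ((cs.length + 3 : Nat) : Int) / 4 = (((cs.length + 3) / 4 : Nat) : Int) from
        (Int.natCast_div _ _).symm]
      exact Int.toNat_natCast _
    rw [hM]
    apply List.map_congr_left
    intro k _
    simp only [Function.comp_apply]
    have h1 : (0 : Int) + 4 * (k : Int) = ((4 * k : Nat) : Int) := by push_cast; ring
    rw [h1, show ((4 * k : Nat) : Int) + 4 = ((4 * k : Nat) : Int) + ((4 : Nat) : Int) from by norm_num]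
    rw [PySem.List.slice_natCast_add]

-- ===== VERDICT (by name: the statement is the Claim_ definition above) =====
theorem format_account_number_spec : Claim_equal_format_account_number := by
  unfold Claim_equal_format_account_number
  intro s _
  unfold Spec_format_account_number format_account_number format_account_number_alt
  by_cases hs : s = ""
  · simp [hs]
  · rw [if_neg hs, if_neg hs]
    have hl : s.toList ≠ [] := by simp [hs]
    obtain ⟨c, t, hct⟩ := List.exists_cons_of_ne_nil hl
    simp only [PySem.Str.join]
    rw [PySem.Str.len_eq]
    rw [List.map_map]
    have hmaps : (List.map (fun i => (String.ofList (PySem.List.slice s.toList (some i) (some (i + 4)))).toList)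
        (PySem.List.pyRange 0 (s.toList.length : Int) 4))
        = (PySem.List.pyRange 0 (s.toList.length : Int) 4).map
            (fun i => PySem.List.slice s.toList (some i) (some (i + 4))) := by
      apply List.map_congr_left; intro i _; simp
    rw [show (String.toList ∘ fun i => String.ofList (PySem.List.slice s.toList (some i) (some (i + 4))))
        = (fun i => (String.ofList (PySem.List.slice s.toList (some i) (some (i + 4)))).toList) from rfl]
    rw [hmaps, pv_B_chunks]
    congr 1
    rw [hct, PySem.List.enumerate_cons, List.foldl_cons]
    have h0 : ¬ (0 < (0 : Int) ∧ PySem.Int.mod (0 : Int) 4 = 0) := by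
      rintro ⟨h, -⟩; exact lt_irrefl _ h
    rw [if_neg h0]
    have : ((0 : Int) + 1) = ((1 : Nat) : Int) := by norm_num
    rw [this, pv_A_loop t ([] ++ [c]) 1 (by omega)]
    rw [show " ".toList = [' '] from rfl]
    rw [← pv_interleave_join_aux t.length t c (le_refl _)]
    simp
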